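-- pv_equiv track=rewrite | github.com/Samay9812/Analytiqal_prod | dataset_page.py | _detect_measure_suffixes
-- ===== SOURCE A (Python) =====
-- from typing import Optional, Dict, List, Tuple, Any
--
-- def _detect_measure_suffixes(columns: List[str]) -> Dict[str, int]:
--     from collections import Counter
--     suffix_counter: Counter = Counter()
--     for col in columns:
--         parts = col.split("_")
--         if len(parts) >= 2:
--             suffix_counter[parts[-1]] += 1
--     return {k: v for k, v in suffix_counter.items() if v >= 3}
-- ===== SOURCE B (Python) =====
-- def _detect_measure_suffixes(columns):
--     suffixes = []
--     for col in columns: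
--         parts = col.split("_")
--         if len(parts) >= 2:
--             suffixes.append(parts[-1])
--     # sort-and-group tally: one run-length scan over the sorted suffix list
--     counts = {}
--     prev = None
--     run = 0
--     for s in sorted(suffixes):
--         if s == prev:
--             run += 1
--         else:
--             if prev is not None:
--                 counts[prev] = run
--             prev = s
--             run = 1
--     if prev is not None:
--         counts[prev] = run
--     return {s: counts[s] for s in dict.fromkeys(suffixes) if counts[s] >= 3}
-- ===== Notes on version B (the rewrite author's own statement) =====
-- stated objective: alternative
-- what changed: B tallies suffixes by sorting the eligible-suffix list and doing a single run-length scan over the sorted list (sort-and-group), then emits first-occurrence-ordered suffixes whose run length is >= 3, instead of A's hash-based Counter accumulation.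
import Mathlib
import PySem

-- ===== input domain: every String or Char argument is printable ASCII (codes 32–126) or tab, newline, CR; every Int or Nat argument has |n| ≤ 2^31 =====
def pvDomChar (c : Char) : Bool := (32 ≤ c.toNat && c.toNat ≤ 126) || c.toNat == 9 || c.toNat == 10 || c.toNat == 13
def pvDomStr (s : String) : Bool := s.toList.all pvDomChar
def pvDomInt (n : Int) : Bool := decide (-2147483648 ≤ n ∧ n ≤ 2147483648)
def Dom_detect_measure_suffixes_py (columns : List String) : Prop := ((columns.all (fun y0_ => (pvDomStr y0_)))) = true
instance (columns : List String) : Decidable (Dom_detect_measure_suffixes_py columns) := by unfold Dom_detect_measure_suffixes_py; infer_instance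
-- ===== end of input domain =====

-- B tallies the eligible suffixes by sorting them and run-length scanning the sorted list
-- (sort-and-group) before emitting first-occurrence-ordered suffixes with run length >= 3,
-- instead of A's hash Counter accumulation (objective: alternative algorithm, not faster).

-- ===== PORT A =====
-- parts[-1]; the default "" is unreachable: it is only applied under the guard len(parts) >= 2
def pvLastPart (parts : List String) : String := (PySem.List.pyGet? parts (-1)).getD ""

def detect_measure_suffixes_py (columns : List String) : List (String × Int) :=
  -- suffix_counter = Counter(); for col in columns: parts = col.split("_"); if len(parts) >= 2: suffix_counter[parts[-1]] += 1
  let counter : PySem.Dict String Int :=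
    columns.foldl (fun d col =>
      let parts := (PySem.Chars.splitOn col.toList "_".toList).map String.ofList
      if 2 ≤ parts.length then d.modify (pvLastPart parts) 0 (· + 1) else d)
      PySem.Dict.empty
  -- {k: v for k, v in suffix_counter.items() if v >= 3} — dict comprehension as a Dict built in order
  (counter.items.foldl (fun r kv => if 3 ≤ kv.2 then r.insert kv.1 kv.2 else r)
    (PySem.Dict.empty : PySem.Dict String Int)).items

-- ===== PORT B =====
-- one step of B's run-length scan over the sorted suffix list; state = (counts, prev, run)
def pvStep (st : PySem.Dict String Int × Option String × Int) (s : String) :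
    PySem.Dict String Int × Option String × Int :=
  if some s = st.2.1 then (st.1, st.2.1, st.2.2 + 1)
  else (match st.2.1 with | none => st.1 | some p => st.1.insert p st.2.2, some s, 1)

-- the trailing "if prev is not None: counts[prev] = run"
def pvFlush (st : PySem.Dict String Int × Option String × Int) : PySem.Dict String Int :=
  match st.2.1 with | none => st.1 | some p => st.1.insert p st.2.2

def detect_measure_suffixes_py_alt (columns : List String) : List (String × Int) :=
  -- suffixes = []; for col in columns: parts = col.split("_"); if len(parts) >= 2: suffixes.append(parts[-1])
  let suffixes : List String :=
    columns.foldl (fun acc col =>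
      let parts := (PySem.Chars.splitOn col.toList "_".toList).map String.ofList
      if 2 ≤ parts.length then acc ++ [pvLastPart parts] else acc) []
  -- counts = {}; prev = None; run = 0; for s in sorted(suffixes): …
  let counts : PySem.Dict String Int :=
    pvFlush ((PySem.List.sorted suffixes (fun s => s) false).foldl pvStep
      (PySem.Dict.empty, none, 0))
  -- {s: counts[s] for s in dict.fromkeys(suffixes) if counts[s] >= 3}
  -- counts[s]: KeyError is unreachable (every s in suffixes is a key of counts), ported as get? + getD 0
  ((PySem.List.dedup suffixes).foldl
    (fun r s => if 3 ≤ (counts.get? s).getD 0 then r.insert s ((counts.get? s).getD 0) else r)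
    (PySem.Dict.empty : PySem.Dict String Int)).items

-- ===== PRECONDITION & SPEC =====
def Spec_detect_measure_suffixes_py (columns : List String) (out : List (String × Int)) : Prop := out = detect_measure_suffixes_py_alt columns
instance (columns : List String) (out : List (String × Int)) : Decidable (Spec_detect_measure_suffixes_py columns out) := by unfold Spec_detect_measure_suffixes_py; infer_instance

-- ===== CLAIM (what is proved, stated in full; the proofs are below) =====
def Claim_equal_detect_measure_suffixes_py : Prop := ∀ (columns : List String), Dom_detect_measure_suffixes_py columns → Spec_detect_measure_suffixes_py columns (detect_measure_suffixes_py columns)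

-- ===== LEMMAS AND PROOFS =====

-- A's conditional counting loop is Counter of the list of eligible keys.
theorem foldl_modify_if_eq_filterMap {α : Type} (p : α → Prop) [DecidablePred p] (k : α → String)
    (columns : List α) (d : PySem.Dict String Int) :
    columns.foldl (fun d col => if p col then d.modify (k col) 0 (· + 1) else d) d
      = (columns.filterMap (fun col => if p col then some (k col) else none)).foldl
          (fun d s => d.modify s 0 (· + 1)) d := by
  induction columns generalizing d with
  | nil => rfl
  | cons c cs ih =>
    by_cases h : p c <;> simp [List.foldl_cons, h, ih]

-- B's suffix-collecting loop collects the same eligible keys.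
theorem foldl_append_if_eq_filterMap {α : Type} (p : α → Prop) [DecidablePred p] (k : α → String)
    (columns : List α) (acc : List String) :
    columns.foldl (fun acc col => if p col then acc ++ [k col] else acc) acc
      = acc ++ columns.filterMap (fun col => if p col then some (k col) else none) := by
  induction columns generalizing acc with
  | nil => simp
  | cons c cs ih =>
    by_cases h : p c <;> simp [List.foldl_cons, h, ih]

-- run-length invariant: scanning a sorted tail M from state (d, some p, r) with p ≤ everything in M
theorem runlength_get? (M : List String) :
    ∀ (d : PySem.Dict String Int) (p : String) (r : Int),
    M.Pairwise (· ≤ ·) → (∀ x ∈ M, p ≤ x) →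
    ∀ q, (pvFlush (M.foldl pvStep (d, some p, r))).get? q
      = if q = p then some (r + (M.count p : Int))
        else if q ∈ M then some ((M.count q : Int)) else d.get? q := by
  induction M with
  | nil =>
    intro d p r _ _ q
    simp [pvFlush, PySem.Dict.get?_insert]
  | cons x xs ih =>
    intro d p r hpw hlo q
    have hxxs : ∀ y ∈ xs, x ≤ y := fun y hy => (List.pairwise_cons.mp hpw).1 y hy
    by_cases hxp : x = p
    · subst hxp
      rw [List.foldl_cons, show pvStep (d, some x, r) x = (d, some x, r + 1) by simp [pvStep]]
      rw [ih d x (r + 1) (List.pairwise_cons.mp hpw).2 hxxs q]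
      by_cases hq : q = x
      · subst hq; simp [List.count_cons_self]; ring
      · simp [hq, List.mem_cons, List.count_cons_of_ne (Ne.symm hq)]
    · have hpx : p < x := lt_of_le_of_ne (hlo x (List.mem_cons_self)) (fun h => hxp h.symm)
      have hpnot : p ∉ xs := fun h => absurd (hxxs p h) (not_le.mpr hpx)
      rw [List.foldl_cons,
        show pvStep (d, some p, r) x = (d.insert p r, some x, 1) by
          simp [pvStep, fun h : x = p => hxp h]]
      rw [ih (d.insert p r) x 1 (List.pairwise_cons.mp hpw).2 hxxs q]
      by_cases hq : q = p
      · subst hq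
        have hqx : q ≠ x := fun h => hxp h.symm
        simp [hqx, hpnot, List.count_cons_of_ne hxp,
          List.count_eq_zero_of_not_mem hpnot]
      · by_cases hqx : q = x
        · subst hqx; simp [hq, List.count_cons_self]; ring
        · by_cases hqm : q ∈ xs
          · rw [List.count_cons_of_ne (Ne.symm hqx)]; simp [hq, hqx, hqm]
          · simp [hq, hqx, hqm, PySem.Dict.get?_insert]

-- counts lookup after the whole scan = occurrence count in the suffix list
theorem counts_get_eq_count (L : List String) (s : String) (hs : s ∈ L) :
    ((pvFlush ((PySem.List.sorted L (fun s => s) false).foldl pvStep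
        (PySem.Dict.empty, none, 0))).get? s).getD 0 = (L.count s : Int) := by
  have hperm : (PySem.List.sorted L (fun s => s) false).Perm L := PySem.List.sorted_perm ..
  have hsM : s ∈ PySem.List.sorted L (fun s => s) false := hperm.mem_iff.mpr hs
  have hcnt : (PySem.List.sorted L (fun s => s) false).count s = L.count s := hperm.count_eq s
  have hpw : (PySem.List.sorted L (fun s => s) false).Pairwise (· ≤ ·) := by
    simpa using PySem.List.sorted_pairwise L (fun s => s)
  cases hMc : PySem.List.sorted L (fun s => s) false with
  | nil => rw [hMc] at hsM; simp at hsM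
  | cons m t =>
    rw [hMc] at hsM hcnt hpw
    rw [List.foldl_cons, show pvStep (PySem.Dict.empty, none, 0) m
        = (PySem.Dict.empty, some m, 1) by simp [pvStep]]
    rw [runlength_get? t PySem.Dict.empty m 1 (List.pairwise_cons.mp hpw).2
      (fun y hy => (List.pairwise_cons.mp hpw).1 y hy) s]
    by_cases hq : s = m
    · subst hq
      rw [← hcnt]; simp [List.count_cons_self]; ring
    · have : s ∈ t := by rcases List.mem_cons.mp hsM with h | h; exact absurd h hq; exact h
      rw [← hcnt, List.count_cons_of_ne (Ne.symm hq)]; simp [hq, this]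

theorem detect_measure_suffixes_eq (columns : List String) :
    detect_measure_suffixes_py columns = detect_measure_suffixes_py_alt columns := by
  unfold detect_measure_suffixes_py detect_measure_suffixes_py_alt
  rw [foldl_modify_if_eq_filterMap
      (fun col : String => 2 ≤ ((PySem.Chars.splitOn col.toList "_".toList).map String.ofList).length)
      (fun col : String => pvLastPart ((PySem.Chars.splitOn col.toList "_".toList).map String.ofList)),
    foldl_append_if_eq_filterMap
      (fun col : String => 2 ≤ ((PySem.Chars.splitOn col.toList "_".toList).map String.ofList).length)
      (fun col : String => pvLastPart ((PySem.Chars.splitOn col.toList "_".toList).map String.ofList))]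
  set L := columns.filterMap (fun col =>
    if 2 ≤ ((PySem.Chars.splitOn col.toList "_".toList).map String.ofList).length
    then some (pvLastPart ((PySem.Chars.splitOn col.toList "_".toList).map String.ofList))
    else none) with hL
  simp only [List.nil_append]
  -- A side: Counter items, filtered at 3
  rw [← PySem.Dict.counter_eq_foldl, PySem.Dict.items_counter, List.foldl_map]
  -- B side: replace the counts lookup by L.count on every member of dedup L
  rw [PySem.List.dedup_eq_ofList]
  congr 1
  apply PySem.List.foldl_congr_mem
  intro r s hsmem
  rw [counts_get_eq_count L s ((PySem.Set.mem_ofList L s).mp hsmem)]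

-- ===== VERDICT (by name: the statement is the Claim_ definition above) =====
theorem detect_measure_suffixes_py_spec : Claim_equal_detect_measure_suffixes_py := by
  intro columns _
  unfold Spec_detect_measure_suffixes_py
  exact detect_measure_suffixes_eq columns
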